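-- pv_equiv track=rewrite | github.com/Bryan-9603012/2026-python | weeks/week-07/solutions/1114405023/10062/main.py | solve
-- ===== SOURCE A (Python) =====
-- class Fenwick:
--     def __init__(self, n: int):
--         self.n = n
--         self.bit = [0] * (n + 1)
--
--     def add(self, i: int, delta: int) -> None:
--         while i <= self.n:
--             self.bit[i] += delta
--             i += i & -i
--
--     def kth(self, k: int) -> int:
--         idx = 0
--         bitmask = 1 << (self.n.bit_length())
--         while bitmask:
--             nxt = idx + bitmask
--             if nxt <= self.n and self.bit[nxt] < k:
--                 idx = nxt
--                 k -= self.bit[nxt]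
--             bitmask >>= 1
--         return idx + 1
--
-- def solve(data: str) -> str:
--     data = data.strip().split()
--     if not data:
--         return ""
--     n = int(data[0])
--     smaller_before = [0] * (n + 1)
--     for i in range(2, n + 1):
--         smaller_before[i] = int(data[i - 1])
--
--     fw = Fenwick(n)
--     for i in range(1, n + 1):
--         fw.add(i, 1)
--
--     ans = [0] * (n + 1)
--     for pos in range(n, 0, -1):
--         rank = smaller_before[pos] + 1
--         value = fw.kth(rank)
--         ans[pos] = value
--         fw.add(value, -1)
--
--     return "\n".join(map(str, ans[1:]))
-- ===== SOURCE B (Python) =====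
-- def solve(data: str) -> str:
--     toks = data.strip().split()
--     if not toks:
--         return ""
--     n = int(toks[0])
--     counts = [0] * max(n, 0)
--     for i in range(2, n + 1):
--         counts[i - 1] = int(toks[i - 1])
--     avail = list(range(1, n + 1))
--     out = []
--     for c in reversed(counts):
--         out.append(avail.pop(c))
--     out.reverse()
--     return "\n".join(map(str, out))
-- ===== Notes on version B (the rewrite author's own statement) =====
-- stated objective: simpler
-- what changed: Replaces the Fenwick tree (binary-indexed tree build, log-time kth-element descent and decrement updates) with a plain sorted list of still-available values from which the k-th smallest is taken by avail.pop(count), trading O(n log n) for O(n^2) in exchange for much shorter, plainer code.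
-- outside the precondition, e.g. on solve('2 2'): A returns '1\n3', B raises IndexError; on solve('3 0 -1'): A returns '3\n2\n1', B returns '2\n1\n3'
import Mathlib
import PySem

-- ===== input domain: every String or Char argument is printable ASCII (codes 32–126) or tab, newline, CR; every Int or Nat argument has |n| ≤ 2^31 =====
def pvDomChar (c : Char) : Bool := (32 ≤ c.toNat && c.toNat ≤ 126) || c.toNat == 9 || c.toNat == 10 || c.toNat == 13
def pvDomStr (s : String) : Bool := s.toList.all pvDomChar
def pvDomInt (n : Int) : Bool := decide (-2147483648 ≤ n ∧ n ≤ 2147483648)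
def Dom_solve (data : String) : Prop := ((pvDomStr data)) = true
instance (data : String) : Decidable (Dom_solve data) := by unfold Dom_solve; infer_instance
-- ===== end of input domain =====

-- B replaces A's Fenwick tree by popping the k-th smallest from a plain sorted list: shorter and plainer
-- (O(n^2) instead of O(n log n); the claim is equality of the RETURN values on Pre_, no mutation is observable).

-- ===== PORT A =====

/-- `i & -i` (Python's lowest-set-bit trick), exactly as A writes it. -/
def pvLowb (i : Int) : Int := PySem.Int.band i (-i)

/-- Termination fact for `addLoop` (cited in `decreasing_by`): `i & -i > 0` for `i > 0`. -/
theorem pvLowb_pos (i : Int) (h : 0 < i) : 0 < pvLowb i := by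
  unfold pvLowb
  unfold PySem.Int.band
  have h0 : (0:Int) ≤ i := le_of_lt h
  have h1 : ¬ (0:Int) ≤ -i := by omega
  simp only [h0, h1, if_true, if_false]
  have h2 : -(-i) - 1 = i - 1 := by ring
  rw [h2]
  have h3 : (i - 1).toNat = i.toNat - 1 := by omega
  rw [h3]
  have h4 : i.toNat &&& (i.toNat - 1) ≤ i.toNat - 1 := Nat.and_le_right
  have h5 : 0 < i.toNat := by omega
  omega

/-- `Fenwick.add`: `while i <= n: bit[i] += delta; i += i & -i`.  The extra `1 ≤ i` guard is a
totality guard only: Python diverges for `i ≤ 0 ≤ n`, and every actual call has `i ≥ 1`. -/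
def addLoop (n delta : Int) (bit : List Int) (i : Int) : List Int :=
  if h : 1 ≤ i ∧ i ≤ n then
    addLoop n delta (PySem.List.pySetD bit i (PySem.List.pyGetD bit i 0 + delta)) (i + pvLowb i)
  else bit
termination_by (n + 1 - i).toNat
decreasing_by
  have := pvLowb_pos i (by omega)
  omega

/-- `Fenwick.kth`'s `while bitmask:` loop.  `bitmask >>= 1` is floor division by 2 (exact for
Python's `>>`); the loop guard is written `0 < bitmask` as a totality guard — `bitmask` starts at
`1 << bit_length ≥ 1` and halves, so it is always nonnegative and `≠ 0 ↔ 0 <`. -/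
def kthLoop (n : Int) (bit : List Int) (bitmask idx k : Int) : Int :=
  if h : 0 < bitmask then
    if idx + bitmask ≤ n ∧ PySem.List.pyGetD bit (idx + bitmask) 0 < k then
      kthLoop n bit (PySem.Int.floordiv bitmask 2) (idx + bitmask)
        (k - PySem.List.pyGetD bit (idx + bitmask) 0)
    else
      kthLoop n bit (PySem.Int.floordiv bitmask 2) idx k
  else idx + 1
termination_by bitmask.toNat
decreasing_by
  all_goals
    rw [PySem.Int.floordiv_eq_ediv_of_pos (by omega)]
    omega

/-- `Fenwick.kth(k)`: `bitmask = 1 << self.n.bit_length()`. -/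
def fenKth (n : Int) (bit : List Int) (k : Int) : Int :=
  kthLoop n bit ((1:Int) <<< PySem.Int.bitLength n) 0 k

def solve (data : String) : String :=
  let toks := PySem.Str.split₀ (PySem.Str.strip data)
  if toks = [] then ""
  else
    let n : Int := (PySem.Int.ofStr? (PySem.List.pyGetD toks 0 "")).getD 0
    let sb : List Int := (PySem.List.pyRange 2 (n + 1) 1).foldl
      (fun a i => PySem.List.pySetD a i
        ((PySem.Int.ofStr? (PySem.List.pyGetD toks (i - 1) "")).getD 0))
      (List.replicate (n + 1).toNat 0)
    let bit := (PySem.List.pyRange 1 (n + 1) 1).foldl (fun b i => addLoop n 1 b i)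
      (List.replicate (n + 1).toNat 0)
    let st := (PySem.List.pyRange n 0 (-1)).foldl
      (fun (st : List Int × List Int) pos =>
        let value := fenKth n st.1 (PySem.List.pyGetD sb pos 0 + 1)
        (addLoop n (-1) st.1 value, PySem.List.pySetD st.2 pos value))
      (bit, List.replicate (n + 1).toNat 0)
    PySem.Str.join "\n" ((PySem.List.slice st.2 (some 1) none).map PySem.Int.toStr)

-- ===== PORT B =====

def solve_alt (data : String) : String :=
  let toks := PySem.Str.split₀ (PySem.Str.strip data)
  if toks = [] then ""
  else
    let n : Int := (PySem.Int.ofStr? (PySem.List.pyGetD toks 0 "")).getD 0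
    let counts : List Int := (PySem.List.pyRange 2 (n + 1) 1).foldl
      (fun a i => PySem.List.pySetD a (i - 1)
        ((PySem.Int.ofStr? (PySem.List.pyGetD toks (i - 1) "")).getD 0))
      (List.replicate (max n 0).toNat 0)
    let st := counts.reverse.foldl
      (fun (st : List Int × List Int) c =>
        match PySem.List.pop? st.1 c with
        | some (v, rest) => (rest, st.2 ++ [v])
        | none => st)  -- `avail.pop(c)` raises IndexError here in Python: outside Pre_
      (PySem.List.pyRange 1 (n + 1) 1, ([] : List Int))
    PySem.Str.join "\n" (st.2.reverse.map PySem.Int.toStr)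


-- ===== PRECONDITION & SPEC =====

-- Pre_ excludes inputs on which A raises (a token that is not an int -> ValueError, fewer than
-- n-1 tokens -> IndexError) and malformed inputs whose smaller-before count values fall outside
-- [0, pos-1]: there A still returns, but a meaningless Fenwick selection, while B's natural
-- avail.pop(c) raises or pops from the end (concrete excluded examples are in claim.json's cites).
def Pre_solve (data : String) : Prop :=
  let toks := PySem.Str.split₀ (PySem.Str.strip data)
  toks ≠ [] →
    (PySem.Int.ofStr? (PySem.List.pyGetD toks 0 "")).isSome = true ∧
    (∀ i ∈ PySem.List.pyRange 2 (((PySem.Int.ofStr? (PySem.List.pyGetD toks 0 "")).getD 0) + 1) 1,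
      PySem.Raise.InRange toks.length (i - 1) ∧
      (PySem.Int.ofStr? (PySem.List.pyGetD toks (i - 1) "")).isSome = true ∧
      0 ≤ (PySem.Int.ofStr? (PySem.List.pyGetD toks (i - 1) "")).getD 0 ∧
      (PySem.Int.ofStr? (PySem.List.pyGetD toks (i - 1) "")).getD 0 ≤ i - 1)

instance (data : String) : Decidable (Pre_solve data) := by unfold Pre_solve; infer_instance

def pvWitness_solve : String := "4 0 1 2"

def Spec_solve (data : String) (out : String) : Prop := out = solve_alt data
instance (data : String) (out : String) : Decidable (Spec_solve data out) := by
  unfold Spec_solve; infer_instance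

-- ===== CLAIM (what is proved, stated in full; the proofs are below) =====
def Claim_equal_solve : Prop :=
  ∀ (data : String), Dom_solve data → Pre_solve data → Spec_solve data (solve data)

-- ===== LEMMAS AND PROOFS =====


theorem nat_land_pred : ∀ m : Nat, 0 < m → ∃ t : Nat, m &&& (m-1) = m - 2^t ∧ 2^t ∣ m ∧ ¬ 2^(t+1) ∣ m := by
  intro m
  induction m using Nat.strong_induction_on with
  | _ m ih =>
    intro hm
    rcases Nat.even_or_odd m with he | ho
    · obtain ⟨k, hk⟩ := he
      have hkpos : 0 < k := by omega
      obtain ⟨t, h1, h2, h3⟩ := ih k (by omega) hkpos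
      have hp : (2:Nat)^(t+1) = 2^t * 2 := pow_succ 2 t
      have hp2 : (2:Nat)^(t+1+1) = 2^(t+1) * 2 := pow_succ 2 (t+1)
      have hb2 : m - 1 = Nat.bit true (k-1) := by simp [Nat.bit]; omega
      have hb : m = Nat.bit false k := by simp [Nat.bit]; omega
      obtain ⟨u, hu⟩ := h2
      have hmul : (2:Nat)^(t+1) * u = 2^t * u * 2 := by rw [hp]; ring
      refine ⟨t+1, ?_, ⟨u, by omega⟩, ?_⟩
      · rw [hb2, hb, Nat.land_bit]
        simp only [Bool.false_and, Nat.bit, cond_false]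
        have h2t : 2^t ≤ k := Nat.le_of_dvd hkpos ⟨u, hu⟩
        omega
      · rintro ⟨v, hv⟩
        have hmul2 : (2:Nat)^(t+1+1) * v = 2^(t+1) * v * 2 := by rw [hp2]; ring
        exact h3 ⟨v, by omega⟩
    · obtain ⟨k, hk⟩ := ho
      have hb : m = Nat.bit true k := by simp [Nat.bit]; omega
      have hb2 : m - 1 = Nat.bit false k := by simp [Nat.bit]; omega
      refine ⟨0, ?_, one_dvd m, ?_⟩
      · rw [hb2, hb, Nat.land_bit]
        simp only [Bool.and_false, Nat.bit, cond_false, Nat.and_self]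
        simp
      · simpa using (by omega : ¬ 2 ∣ m)

theorem pvLowb_eq_cast (i : Int) (h : 0 < i) :
    pvLowb i = ((i.toNat - (i.toNat &&& (i.toNat - 1)) : Nat) : Int) := by
  unfold pvLowb PySem.Int.band
  have h0 : (0:Int) ≤ i := le_of_lt h
  have h1 : ¬ (0:Int) ≤ -i := by omega
  simp only [h0, h1, if_true, if_false]
  have e1 : -(-i) - 1 = i - 1 := by ring
  rw [e1]
  have e2 : (i - 1).toNat = i.toNat - 1 := by omega
  rw [e2]

theorem pvLowb_spec (i : Int) (h : 0 < i) :
    ∃ t : Nat, pvLowb i = 2^t ∧ ((2:Int)^t ∣ i) ∧ ¬ ((2:Int)^(t+1) ∣ i) := by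
  obtain ⟨t, h1, h2, h3⟩ := nat_land_pred i.toNat (by omega)
  have h2t : 2^t ≤ i.toNat := Nat.le_of_dvd (by omega) h2
  refine ⟨t, ?_, ?_, ?_⟩
  · rw [pvLowb_eq_cast i h, h1]
    push_cast [Nat.sub_sub_self h2t]
    rfl
  · have h4 : ((2^t : Nat) : Int) ∣ ((i.toNat : Nat) : Int) := Int.natCast_dvd_natCast.mpr h2
    rw [Int.toNat_of_nonneg (le_of_lt h)] at h4
    exact_mod_cast h4
  · intro hdvd
    refine h3 ?_
    have h5 : ((2:Int)^(t+1)) ∣ ((i.toNat : Nat) : Int) := by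
      rwa [Int.toNat_of_nonneg (le_of_lt h)]
    exact_mod_cast h5

theorem pvLowb_eq_of (i : Int) (t : Nat) (h : 0 < i) (h1 : (2:Int)^t ∣ i)
    (h2 : ¬ (2:Int)^(t+1) ∣ i) : pvLowb i = 2^t := by
  obtain ⟨u, hu1, hu2, hu3⟩ := pvLowb_spec i h
  have htu : t = u := by
    rcases Nat.lt_trichotomy t u with hlt | heq | hgt
    · exact absurd (dvd_trans (pow_dvd_pow 2 (by omega : t+1 ≤ u)) hu2) h2
    · exact heq
    · exact absurd (dvd_trans (pow_dvd_pow 2 (by omega : u+1 ≤ t)) h1) hu3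
  rw [hu1, htu]

theorem pvLowb_add_pow (idx : Int) (t : Nat) (h0 : 0 ≤ idx) (hd : (2:Int)^(t+1) ∣ idx) :
    pvLowb (idx + 2^t) = 2^t := by
  have hpow : (0:Int) < 2^t := by positivity
  have hpow2 : ((2:Int)^(t+1)) = 2^t * 2 := by rw [pow_succ]
  refine pvLowb_eq_of _ t (by omega) ?_ ?_
  · exact dvd_add (dvd_trans ⟨2, hpow2⟩ hd) dvd_rfl
  · intro hc
    have h3 : (2:Int)^(t+1) ∣ 2^t := (dvd_add_right hd).mp hc
    have := Int.le_of_dvd hpow h3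
    omega

-- the Fenwick update-path interval lemma: for j ≠ c the interval (j - lowb j, j] contains c
-- iff it contains c + lowb c
theorem pv_key (c j : Int) (hc : 0 < c) (hj : 0 < j) (hne : j ≠ c) :
    ((c ≤ j ∧ j - pvLowb j < c) ↔ (c + pvLowb c ≤ j ∧ j - pvLowb j < c + pvLowb c)) := by
  obtain ⟨a, ha1, ha2, ha3⟩ := pvLowb_spec c hc
  obtain ⟨b, hb1, hb2, hb3⟩ := pvLowb_spec j hj
  rw [ha1, hb1]
  have hpa : (0:Int) < 2^a := by positivity
  have hpb : (0:Int) < 2^b := by positivity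
  constructor
  · rintro ⟨h1, h2⟩
    constructor
    · by_contra hcon
      -- j ∈ (c, c + 2^a); let d = j - c ∈ (0, 2^a), d < 2^b
      push_neg at hcon
      have hd1 : 0 < j - c := by omega
      have hd2 : j - c < 2^a := by omega
      have hd3 : j - c < 2^b := by omega
      rcases Nat.le_total b a with hba | hab
      · have : (2:Int)^b ∣ (j - c) := dvd_sub hb2 (dvd_trans (pow_dvd_pow 2 hba) ha2)
        have := Int.le_of_dvd hd1 this
        omega
      · have : (2:Int)^a ∣ (j - c) := dvd_sub (dvd_trans (pow_dvd_pow 2 hab) hb2) ha2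
        have := Int.le_of_dvd hd1 this
        omega
    · omega
  · rintro ⟨h1, h2⟩
    refine ⟨by omega, ?_⟩
    by_contra hcon
    push_neg at hcon
    -- d := j - 2^b - c ∈ [0, 2^a); 2^(b+1) ∣ (c + d)
    have hdvd : (2:Int)^(b+1) ∣ (j - 2^b) := by
      obtain ⟨m, hm⟩ := hb2
      have hmodd : ¬ (2:Int) ∣ m := by
        intro ⟨v, hv⟩
        exact hb3 ⟨v, by rw [hm, hv, pow_succ]; ring⟩
      have h2m : (2:Int) ∣ (m - 1) := by
        rcases Int.even_or_odd m with he | ho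
        · exact absurd he.two_dvd hmodd
        · obtain ⟨v, hv⟩ := ho; exact ⟨v, by omega⟩
      obtain ⟨v, hv⟩ := h2m
      exact ⟨v, by rw [hm, pow_succ]; nlinarith [hv]⟩
    have hd0 : 0 ≤ j - 2^b - c := by omega
    have hd1 : j - 2^b - c < 2^a := by omega
    rcases Nat.le_total a b with hab | hba
    · -- 2^(a+1) ∣ (c + d) → 2^a ∣ d → d = 0 → 2^(a+1) ∣ c, contra
      have h4 : (2:Int)^(a+1) ∣ (j - 2^b) := dvd_trans (pow_dvd_pow 2 (by omega)) hdvd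
      have h5 : (2:Int)^a ∣ (j - 2^b - c) :=
        dvd_sub (dvd_trans (pow_dvd_pow 2 (by omega)) h4) ha2
      have hd00 : j - 2^b - c = 0 := by
        rcases eq_or_lt_of_le hd0 with he | hlt
        · omega
        · have := Int.le_of_dvd hlt h5; omega
      exact ha3 (by have : c = j - 2^b := by omega
                    rw [this]; exact h4)
    · -- b < a: 2^(b+1) ∣ d and 2^(b+1) ∣ (2^a - d) ∈ (0, 2^b]: contra
      have hba' : b < a := by
        rcases eq_or_lt_of_le hba with he | hlt
        · exfalso
          -- a = b: d = j - 2^b - c with 2^(b+1) ∣ c + d... handled in first branch; here a=b also fits first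
          have h4 : (2:Int)^(a+1) ∣ (j - 2^b) := by
            rw [(by rw [he] : ((2:Int)^(a+1)) = 2^(b+1))]; exact hdvd
          have h5 : (2:Int)^a ∣ (j - 2^b - c) :=
            dvd_sub (dvd_trans (pow_dvd_pow 2 (by omega)) h4) ha2
          have hd00 : j - 2^b - c = 0 := by
            rcases eq_or_lt_of_le hd0 with he2 | hlt2
            · omega
            · have := Int.le_of_dvd hlt2 h5; omega
          exact ha3 (by have : c = j - 2^b := by omega
                        rw [this]; exact h4)
        · exact hlt
      have h6 : (2:Int)^(b+1) ∣ (j - 2^b - c) := dvd_sub hdvd (dvd_trans (pow_dvd_pow 2 (by omega)) ha2)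
      have h7 : (2:Int)^(b+1) ∣ (2^a - (j - 2^b - c)) := dvd_sub (pow_dvd_pow 2 (by omega)) h6
      have h8 : 0 < 2^a - (j - 2^b - c) := by omega
      have h9 := Int.le_of_dvd h8 h7
      -- need 2^a - d ≤ 2^b i.e. d ≥ 2^a - 2^b: from h1 : c + 2^a ≤ j
      have h10 : (2:Int)^(b+1) = 2^b * 2 := by rw [pow_succ]
      omega


def BitOK (n : Int) (bit : List Int) (P : Int → Int) : Prop :=
  bit.length = (n+1).toNat ∧
  ∀ j : Int, 1 ≤ j → j ≤ n → PySem.List.pyGetD bit j 0 = P j - P (j - pvLowb j)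

theorem pv_get_set (bit : List Int) (c j v : Int) (hc : 0 ≤ c) (hlen : c < (bit.length : Int))
    (hj : 0 ≤ j) :
    PySem.List.pyGetD (PySem.List.pySetD bit c v) j 0
      = if j = c then v else PySem.List.pyGetD bit j 0 := by
  have hc' : ((c.toNat : Nat) : Int) = c := Int.toNat_of_nonneg hc
  have hj' : ((j.toNat : Nat) : Int) = j := Int.toNat_of_nonneg hj
  rw [← hc', ← hj',
      PySem.List.pyGetD_pySetD_natCast bit c.toNat j.toNat v 0 (by omega)]
  simp only [Int.natCast_inj]

theorem pv_len_set (bit : List Int) (c v : Int) :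
    (PySem.List.pySetD bit c v).length = bit.length := by
  exact PySem.List.length_pySetD bit c v

theorem addLoop_ok (n delta : Int) (Q : Int → Int) :
    ∀ (fuel : Nat) (c : Int) (bit : List Int), 1 ≤ c → (n + 1 - c).toNat ≤ fuel →
    bit.length = (n+1).toNat →
    (∀ j : Int, 1 ≤ j → j ≤ n →
      PySem.List.pyGetD bit j 0
        = Q j - Q (j - pvLowb j) - (if c ≤ j ∧ j - pvLowb j < c then delta else 0)) →
    (addLoop n delta bit c).length = (n+1).toNat ∧
    ∀ j : Int, 1 ≤ j → j ≤ n →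
      PySem.List.pyGetD (addLoop n delta bit c) j 0 = Q j - Q (j - pvLowb j) := by
  intro fuel
  induction fuel with
  | zero =>
    intro c bit hc hfuel hlen hbit
    -- fuel 0: c > n, loop exits
    rw [addLoop]
    have hcn : n < c := by omega
    rw [dif_neg (by omega)]
    refine ⟨hlen, fun j hj1 hj2 => ?_⟩
    rw [hbit j hj1 hj2, if_neg (by omega)]
    ring
  | succ fuel ih =>
    intro c bit hc hfuel hlen hbit
    rw [addLoop]
    by_cases hcn : c ≤ n
    · rw [dif_pos ⟨hc, hcn⟩]
      have hlpos := pvLowb_pos c (by omega)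
      apply ih (c + pvLowb c) _ (by omega) (by omega)
      · rw [pv_len_set]; exact hlen
      · intro j hj1 hj2
        have hlenj : c < (((PySem.List.pySetD bit c (PySem.List.pyGetD bit c 0 + delta)).length : Nat) : Int) := by
          rw [pv_len_set, hlen]; omega
        rw [pv_get_set bit c j _ (by omega) (by rw [hlen]; omega) (by omega)]
        by_cases hjc : j = c
        · subst hjc
          rw [if_pos rfl, hbit j hj1 hj2, if_pos ⟨le_refl j, by omega⟩,
              if_neg (by omega)]
          ring
        · rw [if_neg hjc, hbit j hj1 hj2]
          have hkey := pv_key c j (by omega) (by omega) hjc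
          by_cases h1 : c ≤ j ∧ j - pvLowb j < c
          · rw [if_pos h1, if_pos (hkey.mp h1)]
          · rw [if_neg h1, if_neg (fun h => h1 (hkey.mpr h))]
    · rw [dif_neg (by omega)]
      refine ⟨hlen, fun j hj1 hj2 => ?_⟩
      rw [hbit j hj1 hj2, if_neg (by omega)]
      ring

theorem add_correct (n delta i : Int) (bit : List Int) (P : Int → Int)
    (hok : BitOK n bit P) (hi1 : 1 ≤ i) (hi2 : i ≤ n) :
    BitOK n (addLoop n delta bit i) (fun p => P p + (if i ≤ p then delta else 0)) := by
  obtain ⟨hlen, hbit⟩ := hok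
  have h := addLoop_ok n delta (fun p => P p + (if i ≤ p then delta else 0))
    (n + 1 - i).toNat i bit hi1 (le_refl _) hlen ?_
  · exact ⟨h.1, h.2⟩
  · intro j hj1 hj2
    rw [hbit j hj1 hj2]
    have hl := pvLowb_pos j (by omega)
    simp only
    split_ifs <;> omega

theorem floordiv_pow_succ (t : Nat) : PySem.Int.floordiv ((2:Int)^(t+1)) 2 = 2^t := by
  rw [PySem.Int.floordiv_eq_ediv_of_pos (by omega), pow_succ]
  omega

theorem floordiv_one_two : PySem.Int.floordiv (1:Int) 2 = 0 := by
  rw [PySem.Int.floordiv_eq_ediv_of_pos (by omega)]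
  decide

theorem kthLoop_ok (n : Int) (bit : List Int) (P : Int → Int) (k0 : Int)
    (hlen : bit.length = (n+1).toNat)
    (hbit : ∀ j : Int, 1 ≤ j → j ≤ n → PySem.List.pyGetD bit j 0 = P j - P (j - pvLowb j)) :
    ∀ (t : Nat) (idx kc : Int), 0 ≤ idx → idx ≤ n → ((2:Int)^(t+1)) ∣ idx →
    kc = k0 - P idx → P idx < k0 →
    (n < idx + 2^(t+1) ∨ k0 ≤ P (idx + 2^(t+1))) →
    1 ≤ kthLoop n bit (2^t) idx kc ∧ kthLoop n bit (2^t) idx kc ≤ n + 1 ∧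
    P (kthLoop n bit (2^t) idx kc - 1) < k0 ∧
    (n + 1 ≤ kthLoop n bit (2^t) idx kc ∨ k0 ≤ P (kthLoop n bit (2^t) idx kc)) := by
  intro t
  induction t with
  | zero =>
    intro idx kc h0 h1 hdvd hkc hlt hwin
    have hget : idx + 1 ≤ n → PySem.List.pyGetD bit (idx + 1) 0 = P (idx + 1) - P idx := by
      intro h
      have hl : pvLowb (idx + 1) = 1 := by
        have := pvLowb_add_pow idx 0 h0 (by simpa using hdvd)
        simpa using this
      rw [hbit (idx + 1) (by omega) h, hl]
      norm_num
    rw [kthLoop, dif_pos (by norm_num : (0:Int) < 2^0)]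
    simp only [pow_zero] at *
    rw [floordiv_one_two]
    by_cases hcond : idx + 1 ≤ n ∧ PySem.List.pyGetD bit (idx + 1) 0 < kc
    · rw [if_pos hcond, kthLoop, dif_neg (by omega)]
      obtain ⟨hc1, hc2⟩ := hcond
      rw [hget hc1] at hc2
      refine ⟨by omega, by omega, ?_, ?_⟩
      · simpa using (by omega : P (idx + 1) < k0)
      · rcases hwin with h | h
        · left; omega
        · right
          have e : idx + 1 + 1 = idx + 2 := by ring
          rw [e]; simpa using h
    · rw [if_neg hcond, kthLoop, dif_neg (by omega)]
      refine ⟨by omega, by omega, by simpa using hlt, ?_⟩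
      by_cases hc1 : idx + 1 ≤ n
      · right
        have hc2 : ¬ PySem.List.pyGetD bit (idx + 1) 0 < kc := fun h => hcond ⟨hc1, h⟩
        rw [hget hc1] at hc2
        simpa using (by omega : k0 ≤ P (idx + 1))
      · left; omega
  | succ t ih =>
    intro idx kc h0 h1 hdvd hkc hlt hwin
    have hp1 : (0:Int) < 2^(t+1) := by positivity
    have hp2 : ((2:Int)^(t+1+1)) = 2^(t+1) * 2 := by rw [pow_succ]
    have hp3 : ((2:Int)^(t+1)) = 2^t * 2 := by rw [pow_succ]
    have hdvd' : ((2:Int)^(t+1)) ∣ idx := dvd_trans (pow_dvd_pow 2 (by omega)) hdvd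
    rw [kthLoop, dif_pos hp1, floordiv_pow_succ]
    have hget : idx + 2^(t+1) ≤ n →
        PySem.List.pyGetD bit (idx + 2^(t+1)) 0 = P (idx + 2^(t+1)) - P idx := by
      intro h
      have hl : pvLowb (idx + 2^(t+1)) = 2^(t+1) := pvLowb_add_pow idx (t+1) h0 hdvd
      rw [hbit (idx + 2^(t+1)) (by omega) h, hl]
      norm_num
    by_cases hcond : idx + 2^(t+1) ≤ n ∧ PySem.List.pyGetD bit (idx + 2^(t+1)) 0 < kc
    · rw [if_pos hcond]
      obtain ⟨hc1, hc2⟩ := hcond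
      rw [hget hc1] at hc2
      refine ih (idx + 2^(t+1)) _ (by omega) hc1 (dvd_add hdvd' dvd_rfl) (by omega)
        (by omega) ?_
      have he : idx + 2^(t+1) + 2^(t+1) = idx + 2^(t+1+1) := by omega
      rw [he]
      exact hwin
    · rw [if_neg hcond]
      refine ih idx kc h0 h1 hdvd' hkc hlt ?_
      by_cases hc1 : idx + 2^(t+1) ≤ n
      · right
        have hc2 : ¬ PySem.List.pyGetD bit (idx + 2^(t+1)) 0 < kc := fun h => hcond ⟨hc1, h⟩
        rw [hget hc1] at hc2
        omega
      · left; omega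

theorem fenKth_correct (n : Int) (bit : List Int) (P : Int → Int) (k0 : Int)
    (hok : BitOK n bit P) (hn : 1 ≤ n) (hP0 : P 0 = 0) (hk : 0 < k0) (htot : k0 ≤ P n) :
    1 ≤ fenKth n bit k0 ∧ fenKth n bit k0 ≤ n ∧
    P (fenKth n bit k0 - 1) < k0 ∧ k0 ≤ P (fenKth n bit k0) := by
  obtain ⟨hlen, hbit⟩ := hok
  have hshift : (1:Int) <<< PySem.Int.bitLength n = 2^(PySem.Int.bitLength n) := by
    rw [Int.shiftLeft_eq]; ring
  have hnlt : n < 2^(PySem.Int.bitLength n) := by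
    have h := PySem.Int.lt_two_pow_bitLength n
    have h2 : (n.natAbs : Int) < (2:Int)^(PySem.Int.bitLength n) := by exact_mod_cast h
    exact lt_of_le_of_lt Int.le_natAbs h2
  unfold fenKth
  rw [hshift]
  have h := kthLoop_ok n bit P k0 hlen hbit (PySem.Int.bitLength n) 0 k0 (le_refl 0) (by omega)
    (dvd_zero _) (by omega) (by omega) ?_
  · have hne : ¬ (n + 1 ≤ kthLoop n bit (2^(PySem.Int.bitLength n)) 0 k0) := by
      intro hge
      have : kthLoop n bit (2^(PySem.Int.bitLength n)) 0 k0 = n + 1 := by omega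
      rw [this] at h
      simp only [add_sub_cancel_right] at h
      omega
    rcases h with ⟨ha, hb, hc, hd⟩
    exact ⟨ha, by omega, hc, by tauto⟩
  · left
    have : ((2:Int)^(PySem.Int.bitLength n + 1)) = 2^(PySem.Int.bitLength n) * 2 := by rw [pow_succ]
    omega

def PS (S : List Int) (p : Int) : Int := (S.countP (fun x => decide (x ≤ p)) : Nat)

theorem PS_append (S T : List Int) (p : Int) : PS (S ++ T) p = PS S p + PS T p := by
  unfold PS; rw [List.countP_append]; push_cast; ring

theorem PS_nil (p : Int) : PS [] p = 0 := rfl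

theorem PS_zero (S : List Int) (h : ∀ x ∈ S, 1 ≤ x) : PS S 0 = 0 := by
  unfold PS
  rw [List.countP_eq_zero.mpr]
  · rfl
  · intro x hx
    simpa using (by have := h x hx; omega : ¬ x ≤ 0)

theorem PS_total (S : List Int) (n : Int) (h : ∀ x ∈ S, x ≤ n) : PS S n = S.length := by
  unfold PS
  rw [List.countP_eq_length.mpr]
  intro x hx
  simpa using h x hx

theorem PS_singleton (k p : Int) : PS [k] p = if k ≤ p then 1 else 0 := by
  unfold PS
  by_cases h : k ≤ p <;> simp [h]

-- on a strictly sorted list, PS (r-1) < k+1 ≤ PS r pins S[k] = r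
theorem PS_mono_select (S : List Int) (hs : S.Pairwise (· < ·)) (k : Nat) (hk : k < S.length)
    (r : Int) (h1 : PS S (r-1) < (k:Int)+1) (h2 : (k:Int)+1 ≤ PS S r) : S[k] = r := by
  have hget := List.pairwise_iff_getElem.mp hs
  -- (a): S[k] ≤ r
  have ha : S[k] ≤ r := by
    by_contra hcon
    push_neg at hcon
    -- all elements from index k on are > r, so countP ≤ k
    have hsplit : S = S.take k ++ S.drop k := (List.take_append_drop k S).symm
    have hcount : PS S r ≤ (k:Int) := by
      unfold PS
      conv_lhs => rw [hsplit]
      rw [List.countP_append]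
      have hz : (S.drop k).countP (fun x => decide (x ≤ r)) = 0 := by
        rw [List.countP_eq_zero]
        intro x hx
        obtain ⟨i, hi, hxi⟩ := List.getElem_of_mem hx
        have hki : k + i < S.length := by
          rw [List.length_drop] at hi; omega
        have hxe : x = S[k + i] := by rw [← hxi, List.getElem_drop]
        have hle : S[k] ≤ S[k + i] := by
          rcases Nat.eq_zero_or_pos i with h0 | hpos
          · subst h0; simp
          · exact le_of_lt (hget k (k+i) hk hki (by omega))
        simp only [decide_eq_true_eq]
        omega
      have hle : (S.take k).countP (fun x => decide (x ≤ r)) ≤ k := by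
        calc (S.take k).countP (fun x => decide (x ≤ r)) ≤ (S.take k).length :=
              List.countP_le_length
        _ ≤ k := by simp
      omega
    omega
  -- (b): r - 1 < S[k]
  have hb : r - 1 < S[k] := by
    by_contra hcon
    push_neg at hcon
    have hcount : (k:Int)+1 ≤ PS S (r-1) := by
      unfold PS
      have hsplit : S = S.take (k+1) ++ S.drop (k+1) := (List.take_append_drop (k+1) S).symm
      conv_rhs => rw [hsplit]
      rw [List.countP_append]
      have hfull : (S.take (k+1)).countP (fun x => decide (x ≤ r - 1)) = (S.take (k+1)).length := by
        rw [List.countP_eq_length]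
        intro x hx
        obtain ⟨i, hi, hxi⟩ := List.getElem_of_mem hx
        have hile : i ≤ k := by
          have := hi; rw [List.length_take] at this; omega
        have hilen : i < S.length := by omega
        have hxe : x = S[i] := by rw [← hxi, List.getElem_take]
        have hle2 : S[i] ≤ S[k] := by
          rcases Nat.eq_or_lt_of_le hile with h0 | hlt
          · subst h0; simp
          · exact le_of_lt (hget i k hilen hk hlt)
        simp only [decide_eq_true_eq]
        omega
      have hlen1 : (S.take (k+1)).length = k+1 := by
        rw [List.length_take]; omega
      rw [hfull, hlen1]
      push_cast
      omega
    omega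
  omega

theorem PS_eraseIdx (S : List Int) (c : Nat) (hc : c < S.length) (p : Int) :
    PS (S.eraseIdx c) p = PS S p - (if S[c] ≤ p then 1 else 0) := by
  have hsplit : S = S.take c ++ S[c] :: S.drop (c+1) := by
    conv_lhs => rw [← List.take_append_drop c S]
    congr 1
    exact (List.getElem_cons_drop hc).symm
  have hS : PS S p = PS (S.take c) p + (PS [S[c]] p + PS (S.drop (c+1)) p) := by
    conv_lhs => rw [hsplit]
    rw [show S[c] :: S.drop (c+1) = [S[c]] ++ S.drop (c+1) from rfl, PS_append, PS_append]
  rw [List.eraseIdx_eq_take_drop_succ, PS_append, hS, PS_singleton]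
  ring

theorem BitOK_congr (n : Int) (bit : List Int) (P Q : Int → Int)
    (h : ∀ p, P p = Q p) (hok : BitOK n bit P) : BitOK n bit Q := by
  obtain ⟨hlen, hbit⟩ := hok
  exact ⟨hlen, fun j h1 h2 => by rw [hbit j h1 h2, h, h]⟩

theorem BitOK_zeros (n : Int) : BitOK n (List.replicate (n+1).toNat 0) (fun _ => 0) := by
  refine ⟨by simp, fun j h1 h2 => ?_⟩
  rw [PySem.List.pyGetD_of_nonneg _ _ (by omega)]
  simp [List.getD_eq_getElem?_getD]

theorem build_ok (n : Int) : ∀ m : Nat, (m : Int) ≤ n →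
    BitOK n ((PySem.List.pyRange 1 ((m:Int)+1) 1).foldl (fun b i => addLoop n 1 b i)
        (List.replicate (n+1).toNat 0))
      (PS (PySem.List.pyRange 1 ((m:Int)+1) 1)) := by
  intro m
  induction m with
  | zero =>
    intro _
    rw [PySem.List.pyRange_one_eq_nil (by omega)]
    exact BitOK_congr n _ _ _ (fun p => (PS_nil p).symm) (BitOK_zeros n)
  | succ m ih =>
    intro hm
    have hcast : ((m:Int)+1) = ((m+1 : Nat) : Int) := by push_cast; ring
    rw [← hcast]
    rw [show (m:Int) + 1 + 1 = ((m:Int)+1) + 1 from by ring]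
    rw [PySem.List.pyRange_one_succ_right (by omega), List.foldl_append]
    refine BitOK_congr n _ _ _ (fun p => ?_)
      (add_correct n 1 ((m:Int)+1) _ _ (ih (by omega)) (by omega) (by omega))
    show PS _ p + _ = _
    rw [PS_append, PS_singleton]

-- the two set-loops build the same list, shifted by the leading 0
theorem shift_fold (f : Int → Int) :
    ∀ (l : List Int) (xs : List Int), (∀ i ∈ l, 1 ≤ i) →
    l.foldl (fun a i => PySem.List.pySetD a i (f i)) (0 :: xs)
      = 0 :: l.foldl (fun a i => PySem.List.pySetD a (i-1) (f i)) xs := by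
  intro l
  induction l with
  | nil => intro xs _; rfl
  | cons i rest ih =>
    intro xs hmem
    have hi : 1 ≤ i := hmem i List.mem_cons_self
    simp only [List.foldl_cons]
    rw [show PySem.List.pySetD (0 :: xs) i (f i) = 0 :: PySem.List.pySetD xs (i-1) (f i) from ?_]
    · exact ih _ (fun x hx => hmem x (List.mem_cons_of_mem _ hx))
    · rw [PySem.List.pySetD_of_nonneg _ _ (by omega), PySem.List.pySetD_of_nonneg _ _ (by omega)]
      have : i.toNat = (i-1).toNat + 1 := by omega
      rw [this, List.set_cons_succ]

theorem setsFold_len (f : Int → Int) :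
    ∀ (l : List Int) (xs : List Int),
    (l.foldl (fun a i => PySem.List.pySetD a (i-1) (f i)) xs).length = xs.length := by
  intro l
  induction l with
  | nil => intro xs; rfl
  | cons i rest ih =>
    intro xs
    simp only [List.foldl_cons]
    rw [ih, pv_len_set]

theorem setsFold_getD (f : Int → Int) :
    ∀ (l : List Int) (xs : List Int) (j : Nat), (∀ i ∈ l, 1 ≤ i ∧ i - 1 < (xs.length : Int)) →
    (j : Int) < xs.length →
    (l.foldl (fun a i => PySem.List.pySetD a (i-1) (f i)) xs).getD j 0
      = if ((j:Int)+1) ∈ l then f ((j:Int)+1) else xs.getD j 0 := by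
  intro l
  induction l with
  | nil => intro xs j _ _; simp
  | cons i rest ih =>
    intro xs j hmem hj
    obtain ⟨hi, hirange⟩ := hmem i List.mem_cons_self
    simp only [List.foldl_cons]
    rw [ih _ j (fun x hx => by have := hmem x (List.mem_cons_of_mem _ hx); rw [pv_len_set]; exact this)
        (by rw [pv_len_set]; omega)]
    by_cases hr : ((j:Int)+1) ∈ rest
    · rw [if_pos hr, if_pos (List.mem_cons_of_mem _ hr)]
    · rw [if_neg hr]
      by_cases hji : ((j:Int)+1) = i
      · rw [if_pos (by rw [hji]; exact List.mem_cons_self)]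
        have hgs := pv_get_set xs (i-1) ((j:Int)) (f i) (by omega) (by omega) (by omega)
        rw [PySem.List.pyGetD_of_nonneg _ _ (by omega), PySem.List.pyGetD_of_nonneg _ _ (by omega)] at hgs
        simp only [Int.toNat_natCast] at hgs
        rw [hgs, if_pos (by omega), hji]
      · rw [if_neg (by intro hmem2; rcases List.mem_cons.mp hmem2 with h | h; exact hji h; exact hr h)]
        have hgs := pv_get_set xs (i-1) ((j:Int)) (f i) (by omega) (by omega) (by omega)
        rw [PySem.List.pyGetD_of_nonneg _ _ (by omega), PySem.List.pyGetD_of_nonneg _ _ (by omega)] at hgs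
        simp only [Int.toNat_natCast] at hgs
        rw [hgs, if_neg (by omega)]

theorem drop_set_cons (xs : List Int) (i : Nat) (v : Int) (h : i < xs.length) :
    (xs.set i v).drop i = v :: xs.drop (i+1) := by
  have hl : i < (xs.set i v).length := by simpa using h
  rw [← List.getElem_cons_drop hl, List.getElem_set_self, List.drop_set, if_pos (by omega)]

theorem sel_loop (n : Int) (sb cs : List Int)
    (hsb : ∀ pos : Int, 1 ≤ pos → PySem.List.pyGetD sb pos 0 = cs.getD (pos - 1).toNat 0) :
    ∀ (m : Nat) (S bit ans out : List Int),
    S.Pairwise (· < ·) → (∀ x ∈ S, 1 ≤ x ∧ x ≤ n) → S.length = m → m ≤ cs.length →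
    (m : Int) ≤ n → BitOK n bit (PS S) →
    (∀ j : Nat, j < m → 0 ≤ cs.getD j 0 ∧ (cs.getD j 0 : Int) ≤ (j:Int)) →
    ans.length = (n+1).toNat →
    ∃ vs : List Int, vs.length = m ∧
      ((PySem.List.pyRange (m:Int) 0 (-1)).foldl
        (fun (st : List Int × List Int) pos =>
          let value := fenKth n st.1 (PySem.List.pyGetD sb pos 0 + 1)
          (addLoop n (-1) st.1 value, PySem.List.pySetD st.2 pos value)) (bit, ans)).2
        = ans.take 1 ++ vs ++ ans.drop (m+1) ∧
      (((cs.take m).reverse).foldl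
        (fun (st : List Int × List Int) c =>
          match PySem.List.pop? st.1 c with
          | some (v, rest) => (rest, st.2 ++ [v])
          | none => st) (S, out)).2
        = out ++ vs.reverse := by
  intro m
  induction m with
  | zero =>
    intro S bit ans out _ _ _ _ _ _ _ _
    refine ⟨[], rfl, ?_, ?_⟩
    · rw [PySem.List.pyRange_neg_one_eq_nil (by omega)]
      simp only [List.foldl_nil, List.nil_append, List.append_nil]
      rw [show (0:Nat)+1 = 1 from rfl, List.take_append_drop]
    · simp
  | succ m ih =>
    intro S bit ans out hsort hmem hlen hcs hmn hok hbound hanslen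
    -- peel position m+1 from A's countdown range
    have hA1 : PySem.List.pyRange ((m+1 : Nat) : Int) 0 (-1)
        = ((m+1 : Nat) : Int) :: PySem.List.pyRange ((m:Nat) : Int) 0 (-1) := by
      have he : ((m+1 : Nat) : Int) - 1 = ((m:Nat) : Int) := by push_cast; ring
      rw [PySem.List.pyRange_neg_one_cons (by push_cast; omega), he]
    -- peel count m from B's reversed counts
    have hmlt : m < cs.length := by omega
    have hB1 : (cs.take (m+1)).reverse = cs.getD m 0 :: (cs.take m).reverse := by
      rw [List.getD_eq_getElem cs 0 hmlt, List.take_succ, List.getElem?_eq_getElem hmlt]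
      simp
    set c : Int := cs.getD m 0 with hc
    obtain ⟨hc0, hcm⟩ := hbound m (by omega)
    have hcS : c.toNat < S.length := by omega
    -- the value A selects
    have hsb1 : PySem.List.pyGetD sb ((m+1 : Nat) : Int) 0 = c := by
      rw [hsb _ (by push_cast; omega)]
      congr 1
      push_cast
      omega
    have htot : PS S n = ((m:Int)+1) := by
      rw [PS_total S n (fun x hx => (hmem x hx).2), hlen]
      push_cast
      ring
    have hfk := fenKth_correct n bit (PS S) (c+1) hok (by push_cast at hmn; omega)
      (PS_zero S (fun x hx => (hmem x hx).1)) (by omega) (by omega)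
    set r : Int := fenKth n bit (c+1) with hr
    obtain ⟨hr1, hr2, hr3, hr4⟩ := hfk
    have hsel : S[c.toNat] = r := by
      refine PS_mono_select S hsort c.toNat hcS r ?_ ?_
      · rw [show ((c.toNat : Nat) : Int) + 1 = c + 1 from by omega]; exact hr3
      · rw [show ((c.toNat : Nat) : Int) + 1 = c + 1 from by omega]; exact hr4
    -- B pops the same value
    have hpop : PySem.List.pop? S c = some (r, S.eraseIdx c.toNat) := by
      conv_lhs => rw [show c = ((c.toNat : Nat) : Int) from by omega]
      rw [PySem.List.pop?_natCast S c.toNat hcS, hsel]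
    -- the new Fenwick state matches the shrunken list
    have hok' : BitOK n (addLoop n (-1) bit r) (PS (S.eraseIdx c.toNat)) := by
      refine BitOK_congr n _ _ _ (fun p => ?_) (add_correct n (-1) r bit (PS S) hok hr1 hr2)
      rw [PS_eraseIdx S c.toNat hcS p, hsel]
      split_ifs <;> ring
    have ih' := ih (S.eraseIdx c.toNat) (addLoop n (-1) bit r)
      (PySem.List.pySetD ans ((m+1 : Nat) : Int) r) (out ++ [r])
      (hsort.sublist (List.eraseIdx_sublist S c.toNat))
      (fun x hx => hmem x ((List.eraseIdx_sublist S c.toNat).subset hx))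
      (by rw [List.length_eraseIdx_of_lt hcS, hlen]; omega)
      (by omega) (by push_cast at hmn ⊢; omega) hok'
      (fun j hj => hbound j (by omega))
      (by rw [pv_len_set]; exact hanslen)
    obtain ⟨vs', hvs'len, hAr, hBr⟩ := ih'
    refine ⟨vs' ++ [r], by simp [hvs'len], ?_, ?_⟩
    · rw [hA1, List.foldl_cons]
      simp only [hsb1, ← hr]
      rw [hAr]
      -- rewrite the set list
      have hset : PySem.List.pySetD ans ((m+1 : Nat) : Int) r = ans.set (m+1) r := by
        rw [PySem.List.pySetD_of_nonneg _ _ (by push_cast; omega)]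
        simp
      have hlt : m + 1 < ans.length := by
        rw [hanslen]; push_cast at hmn; omega
      rw [hset, List.take_set_of_le (by omega), drop_set_cons ans (m+1) r hlt]
      simp [List.append_assoc]
    · rw [hB1, List.foldl_cons]
      simp only [hpop]
      rw [hBr]
      simp

theorem core_eq (n : Int) (toks : List String)
    (hpre : ∀ i ∈ PySem.List.pyRange 2 (n + 1) 1,
      0 ≤ (PySem.Int.ofStr? (PySem.List.pyGetD toks (i-1) "")).getD 0 ∧
      (PySem.Int.ofStr? (PySem.List.pyGetD toks (i-1) "")).getD 0 ≤ i - 1) :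
    (let sb : List Int := (PySem.List.pyRange 2 (n + 1) 1).foldl
        (fun a i => PySem.List.pySetD a i
          ((PySem.Int.ofStr? (PySem.List.pyGetD toks (i - 1) "")).getD 0))
        (List.replicate (n + 1).toNat 0)
     let bit := (PySem.List.pyRange 1 (n + 1) 1).foldl (fun b i => addLoop n 1 b i)
        (List.replicate (n + 1).toNat 0)
     let st := (PySem.List.pyRange n 0 (-1)).foldl
        (fun (st : List Int × List Int) pos =>
          let value := fenKth n st.1 (PySem.List.pyGetD sb pos 0 + 1)
          (addLoop n (-1) st.1 value, PySem.List.pySetD st.2 pos value))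
        (bit, List.replicate (n + 1).toNat 0)
     PySem.Str.join "\n" ((PySem.List.slice st.2 (some 1) none).map PySem.Int.toStr))
    = (let counts : List Int := (PySem.List.pyRange 2 (n + 1) 1).foldl
        (fun a i => PySem.List.pySetD a (i - 1)
          ((PySem.Int.ofStr? (PySem.List.pyGetD toks (i - 1) "")).getD 0))
        (List.replicate (max n 0).toNat 0)
       let st := counts.reverse.foldl
        (fun (st : List Int × List Int) c =>
          match PySem.List.pop? st.1 c with
          | some (v, rest) => (rest, st.2 ++ [v])
          | none => st)
        (PySem.List.pyRange 1 (n + 1) 1, ([] : List Int))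
       PySem.Str.join "\n" (st.2.reverse.map PySem.Int.toStr)) := by
  by_cases hn : n ≤ 0
  · -- both sides are the empty join
    have hA : PySem.List.pyRange n 0 (-1) = [] := PySem.List.pyRange_neg_one_eq_nil hn
    have hB : PySem.List.pyRange 2 (n+1) 1 = [] := PySem.List.pyRange_one_eq_nil (by omega)
    have hmax : (max n 0).toNat = 0 := by omega
    simp only [hA, hB, hmax, List.foldl_nil, List.replicate_zero, List.reverse_nil]
    congr 1
    rw [PySem.List.slice_from _ (by omega : (0:Int) ≤ 1)]
    have : (List.replicate (n+1).toNat (0:Int)).drop 1 = [] := by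
      apply List.drop_eq_nil_of_le
      simp
      omega
    simp only [Int.toNat_one]
    rw [this]
  · -- n ≥ 1
    push_neg at hn
    set f : Int → Int := fun i => (PySem.Int.ofStr? (PySem.List.pyGetD toks (i - 1) "")).getD 0
      with hf
    have hmax : max n 0 = n := max_eq_left (by omega)
    have hnt : ((n.toNat : Nat) : Int) = n := Int.toNat_of_nonneg (by omega)
    have hnt1 : (n + 1).toNat = n.toNat + 1 := by omega
    set counts : List Int := (PySem.List.pyRange 2 (n + 1) 1).foldl
        (fun a i => PySem.List.pySetD a (i - 1) (f i))
        (List.replicate (max n 0).toNat 0) with hcounts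
    -- length of counts
    have hcslen : counts.length = n.toNat := by
      rw [hcounts, setsFold_len, List.length_replicate, hmax]
    -- sb is counts with a 0 in front
    have hsb0 : (PySem.List.pyRange 2 (n + 1) 1).foldl
        (fun a i => PySem.List.pySetD a i (f i)) (List.replicate (n + 1).toNat 0)
        = 0 :: counts := by
      rw [hnt1, List.replicate_succ, shift_fold f _ _
        (fun i hi => by have := (PySem.List.mem_pyRange_one.mp hi).1; omega)]
      rw [hcounts, hmax]
    -- reading sb
    have hsb : ∀ pos : Int, 1 ≤ pos →
        PySem.List.pyGetD ((PySem.List.pyRange 2 (n + 1) 1).foldl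
          (fun a i => PySem.List.pySetD a i (f i)) (List.replicate (n + 1).toNat 0)) pos 0
        = counts.getD (pos - 1).toNat 0 := by
      intro pos hpos
      rw [hsb0, PySem.List.pyGetD_of_nonneg _ _ (by omega)]
      have : pos.toNat = (pos - 1).toNat + 1 := by omega
      rw [this, List.getD_cons_succ]
    -- count bounds
    have hbound : ∀ j : Nat, j < n.toNat → 0 ≤ counts.getD j 0 ∧ (counts.getD j 0 : Int) ≤ (j:Int) := by
      intro j hj
      rw [hcounts, setsFold_getD f _ _ j
        (fun i hi => by
          have h2 := PySem.List.mem_pyRange_one.mp hi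
          constructor
          · omega
          · rw [List.length_replicate, hmax]; omega)
        (by rw [List.length_replicate, hmax]; omega)]
      by_cases hjm : ((j:Int)+1) ∈ PySem.List.pyRange 2 (n + 1) 1
      · rw [if_pos hjm]
        have h2 := PySem.List.mem_pyRange_one.mp hjm
        have h3 := hpre ((j:Int)+1) hjm
        refine ⟨h3.1, ?_⟩
        have h32 : f ((j:Int)+1) ≤ ((j:Int)+1) - 1 := h3.2
        omega
      · rw [if_neg hjm, List.getD_replicate _ (by omega)]
        omega
    -- the available-value list
    have hS0len : (PySem.List.pyRange 1 (n + 1) 1).length = n.toNat :=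
      by rw [PySem.List.length_pyRange_one]; omega
    have hS0sort : (PySem.List.pyRange 1 (n + 1) 1).Pairwise (· < ·) :=
      PySem.List.pairwise_lt_pyRange_one 1 (n+1)
    have hS0mem : ∀ x ∈ PySem.List.pyRange 1 (n + 1) 1, 1 ≤ x ∧ x ≤ n := by
      intro x hx
      have := PySem.List.mem_pyRange_one.mp hx
      omega
    -- the built Fenwick array
    have hbuild : BitOK n ((PySem.List.pyRange 1 (n + 1) 1).foldl (fun b i => addLoop n 1 b i)
        (List.replicate (n + 1).toNat 0)) (PS (PySem.List.pyRange 1 (n + 1) 1)) := by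
      have := build_ok n n.toNat (by omega)
      rwa [hnt] at this
    -- run the joint selection lemma
    obtain ⟨vs, hvslen, hA, hB⟩ := sel_loop n _ counts hsb n.toNat
      (PySem.List.pyRange 1 (n + 1) 1) _ (List.replicate (n + 1).toNat 0) []
      hS0sort hS0mem hS0len (by omega) (by omega) hbuild hbound (by simp)
    rw [hnt] at hA
    -- identify B's fold input with the take-reverse form
    have htake : counts.take n.toNat = counts := by
      rw [← hcslen, List.take_length]
    rw [htake] at hB
    simp only []
    rw [hsb0] at hA ⊢
    rw [hA, hB]
    congr 1
    -- A's slice of the written answer equals vs; B's reverse of the output too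
    have hansA : (List.replicate (n+1).toNat (0:Int)).take 1 ++ vs
        ++ (List.replicate (n+1).toNat (0:Int)).drop (n.toNat + 1) = 0 :: vs := by
      rw [hnt1, List.replicate_succ]
      simp
    rw [hansA, PySem.List.slice_from _ (by omega : (0:Int) ≤ 1)]
    simp

-- ===== VERDICT (by name: the statement is the Claim_ definition above) =====
theorem solve_spec : Claim_equal_solve := by
  unfold Claim_equal_solve Spec_solve
  intro data _ hpre
  unfold Pre_solve at hpre
  unfold solve solve_alt
  by_cases hemp : PySem.Str.split₀ (PySem.Str.strip data) = []
  · simp only [hemp, if_pos]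
  · simp only [hemp, if_neg, not_false_iff, reduceIte]
    exact core_eq _ _ (fun i hi => (((hpre hemp).2) i hi).2.2)
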